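-- pv_equiv track=rewrite | github.com/Salihbayraktar/Patika-Python | CoderByteChallenge/SwapII.py | SwapII
-- ===== SOURCE A (Python) =====
-- def SwapII(strParam):
--     strParam = strParam.swapcase()
--     words = strParam.split(' ')
--     for i in range(len(words)):
--         charCounter = 0
--         firstNumIndex = -1
--         secNumIndex = -1
--         for j in range(len(words[i])):
--             if words[i][j].isdigit() and firstNumIndex == -1:
--                 firstNumIndex = j
--                 charCounter = 0
--             elif words[i][j].isdigit() and firstNumIndex != -1:
--                 secNumIndex = j
--                 if charCounter !=0:
--                     ListI = list(words[i])
--                     ListI[firstNumIndex], ListI[secNumIndex] = ListI[secNumIndex], ListI[firstNumIndex]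
--                     words[i] = ''.join(ListI)
--                 firstNumIndex = -1
--                 secNumIndex = -1
--                 charCounter = 0
--             elif words[i][j].isalpha():
--                 charCounter += 1
--     return ' '.join(words)
-- ===== SOURCE B (Python) =====
-- def _apply(chars, idx):
--     while len(idx) >= 2:
--         p, q = idx[0], idx[1]
--         if any(c.isalpha() for c in chars[p + 1:q]):
--             chars[p], chars[q] = chars[q], chars[p]
--         idx = idx[2:]
--     return chars
--
--
-- def _swap_word(word):
--     chars = list(word)
--     idx = [j for j, c in enumerate(chars) if c.isdigit()]
--     return ''.join(_apply(chars, idx))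
--
--
-- def SwapII(strParam):
--     return ' '.join(_swap_word(w) for w in strParam.swapcase().split(' '))
-- ===== Notes on version B (the rewrite author's own statement) =====
-- stated objective: alternative
-- what changed: Replaces A's per-character state machine (firstNumIndex/charCounter flags threaded through one scan with in-loop swapping) by a two-phase decomposition: collect each word's digit indices once, then consume that index list two at a time, swapping a pair (p,q) iff the strictly-between slice word[p+1:q] contains a letter.
import Mathlib
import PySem

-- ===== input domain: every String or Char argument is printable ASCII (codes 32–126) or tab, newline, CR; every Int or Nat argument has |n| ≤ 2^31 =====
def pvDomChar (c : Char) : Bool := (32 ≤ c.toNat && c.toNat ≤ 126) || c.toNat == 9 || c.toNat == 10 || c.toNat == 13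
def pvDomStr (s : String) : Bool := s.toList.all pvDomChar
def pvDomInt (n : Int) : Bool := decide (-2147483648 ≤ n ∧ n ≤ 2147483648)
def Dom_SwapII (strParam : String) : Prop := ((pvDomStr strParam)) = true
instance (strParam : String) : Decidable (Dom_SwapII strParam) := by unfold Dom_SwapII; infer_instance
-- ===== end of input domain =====

-- B replaces A's one-pass firstNumIndex/charCounter state machine by a two-phase decomposition
-- (collect each word's digit indices, then consume them pairwise); same behaviour, no speed claim.


-- ===== PORT A =====
-- str.swapcase(), per character; exact on the ASCII input domain
def pvSwapcaseChar (c : Char) : Char :=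
  if PySem.Chars.isupper c then PySem.Chars.lowerChar c
  else if PySem.Chars.islower c then PySem.Chars.upperChar c
  else c

-- 'xs[p], xs[q] = xs[q], xs[p]' (RHS read before either store); this statement occurs verbatim in both Pythons
def pvSwap (w : List Char) (p q : Int) : List Char :=
  PySem.List.pySetD (PySem.List.pySetD w p (PySem.List.pyGetD w q ' ')) q (PySem.List.pyGetD w p ' ')

-- the body of A's inner 'for j in range(len(words[i]))' loop; state = (words[i], charCounter, firstNumIndex)
def pvStepA (st : List Char × Int × Int) (j : Int) : List Char × Int × Int :=
  let w := st.1
  let cnt := st.2.1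
  let first := st.2.2
  let ch := PySem.List.pyGetD w j ' '
  if PySem.Chars.isdigit ch && (first == -1) then (w, 0, j)
  else if PySem.Chars.isdigit ch && (first != -1) then
    -- secNumIndex = j; swap when charCounter != 0; then reset all three
    (if cnt != 0 then pvSwap w first j else w, 0, -1)
  else if PySem.Chars.isalpha ch then (w, cnt + 1, first)
  else (w, cnt, first)

def pvWordA (w : List Char) : List Char :=
  ((PySem.List.pyRange 0 (w.length : Int) 1).foldl pvStepA (w, 0, -1)).1

-- A's outer loop 'for i in range(len(words)): words[i] = …' rewrites each entry independently: a map
def SwapII (strParam : String) : String :=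
  String.ofList (PySem.Chars.join [' ']
    ((PySem.Chars.splitOn (strParam.toList.map pvSwapcaseChar) [' ']).map pvWordA))

-- ===== PORT B =====
-- Source B _apply: 'while len(idx) >= 2: … idx = idx[2:]'
def pvApplyB (chars : List Char) (idx : List Int) : List Char :=
  match idx with
  | p :: q :: rest =>
      pvApplyB
        (if (PySem.List.slice chars (some (p + 1)) (some q)).any PySem.Chars.isalpha then
           pvSwap chars p q
         else chars) rest
  | _ => chars

-- Source B _swap_word
def pvWordB (w : List Char) : List Char :=
  pvApplyB w
    (((PySem.List.enumerate w 0).filter (fun jc => PySem.Chars.isdigit jc.2)).map (·.1))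

def SwapII_alt (strParam : String) : String :=
  String.ofList (PySem.Chars.join [' ']
    ((PySem.Chars.splitOn (strParam.toList.map pvSwapcaseChar) [' ']).map pvWordB))

-- ===== PRECONDITION & SPEC =====
def Spec_SwapII (strParam : String) (out : String) : Prop := out = SwapII_alt strParam
instance (strParam : String) (out : String) : Decidable (Spec_SwapII strParam out) := by
  unfold Spec_SwapII; infer_instance

-- ===== CLAIM =====
def Claim_equal_SwapII : Prop :=
  ∀ (strParam : String), Dom_SwapII strParam → Spec_SwapII strParam (SwapII strParam)

-- ===== LEMMAS AND PROOFS =====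

-- digit indices of a word suffix, carrying the absolute position s of its head
def pvDIdx : List Char → Nat → List Nat
  | [], _ => []
  | c :: t, s => if PySem.Chars.isdigit c then s :: pvDIdx t (s + 1) else pvDIdx t (s + 1)

-- digit indices of w that are ≥ j
def pvD (w : List Char) (j : Nat) : List Nat := pvDIdx (w.drop j) j

-- Nat-index swap
def pvSwapN (w : List Char) (p q : Nat) : List Char :=
  (w.set p (w.getD q ' ')).set q (w.getD p ' ')

-- is there a letter at a position in [a, b)?
def pvAnyA (w : List Char) (a b : Nat) : Bool :=
  ((w.drop a).take (b - a)).any PySem.Chars.isalpha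

-- the common specification both per-word computations meet
def pvSpecN (w : List Char) : List Nat → List Char
  | p :: q :: rest => pvSpecN (if pvAnyA w (p + 1) q then pvSwapN w p q else w) rest
  | _ => w

lemma pvSwap_natCast (w : List Char) (p q : Nat) :
    pvSwap w (p : Int) (q : Int) = pvSwapN w p q := by
  simp [pvSwap, pvSwapN]

lemma pvAnyA_self (w : List Char) (a : Nat) : pvAnyA w a a = false := by
  simp [pvAnyA]

lemma pvD_step (w : List Char) (j : Nat) (hj : j < w.length) :
    pvD w j = if PySem.Chars.isdigit (w.getD j ' ') then j :: pvD w (j + 1) else pvD w (j + 1) := by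
  have h : w.drop j = w[j] :: w.drop (j + 1) := List.drop_eq_getElem_cons hj
  rw [pvD, h, pvDIdx, List.getD_eq_getElem w ' ' hj]
  rfl

lemma pvD_end (w : List Char) : pvD w w.length = [] := by
  simp [pvD, pvDIdx]

lemma getD_set (l : List Char) (n k : Nat) (v d : Char) :
    (l.set n v).getD k d = if k = n ∧ n < l.length then v else l.getD k d := by
  simp only [List.getD_eq_getElem?_getD, List.getElem?_set]
  split_ifs <;> simp_all

lemma pvSwapN_length (w : List Char) (p q : Nat) : (pvSwapN w p q).length = w.length := by
  simp [pvSwapN]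

lemma pvSwapN_getD (w : List Char) (p q k : Nat) (hp : p < w.length) (hq : q < w.length) :
    (pvSwapN w p q).getD k ' ' =
      if k = q then w.getD p ' ' else if k = p then w.getD q ' ' else w.getD k ' ' := by
  rw [pvSwapN, getD_set, getD_set]
  simp only [List.length_set]
  split_ifs <;> simp_all

lemma pvAnyA_step (w : List Char) (a j : Nat) (ha : a ≤ j) (hj : j < w.length) :
    pvAnyA w a (j + 1) = (pvAnyA w a j || PySem.Chars.isalpha (w.getD j ' ')) := by
  have h1 : j + 1 - a = (j - a) + 1 := by omega
  have h2 : (w.drop a)[j - a]? = some w[j] := by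
    rw [List.getElem?_drop]
    have : a + (j - a) = j := by omega
    rw [this, List.getElem?_eq_getElem hj]
  rw [pvAnyA, pvAnyA, h1, List.take_add_one, h2, List.getD_eq_getElem w ' ' hj]
  simp

lemma pvDIdx_congr (u v : List Char) (s : Nat)
    (hl : u.length = v.length)
    (hc : ∀ i (h : i < u.length), PySem.Chars.isdigit u[i] = PySem.Chars.isdigit (v[i]'(hl ▸ h))) :
    pvDIdx u s = pvDIdx v s := by
  induction u generalizing v s with
  | nil => cases v with
    | nil => rfl
    | cons c t => simp at hl
  | cons c t ih =>
    cases v with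
    | nil => simp at hl
    | cons c' t' =>
      have h0 := hc 0 (by simp)
      simp only [List.length_cons, Nat.add_right_cancel_iff] at hl
      simp only [List.getElem_cons_zero] at h0
      have := ih t' (s + 1) hl (fun i h => by
        have := hc (i + 1) (by simpa using Nat.succ_lt_succ h)
        simpa using this)
      simp [pvDIdx, h0, this]

lemma pvD_swap (w : List Char) (p q : Nat) (hp : p < w.length) (hq : q < w.length)
    (hdp : PySem.Chars.isdigit (w.getD p ' ') = true)
    (hdq : PySem.Chars.isdigit (w.getD q ' ') = true) (a : Nat) :
    pvD (pvSwapN w p q) a = pvD w a := by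
  have hlen : (pvSwapN w p q).length = w.length := by simp [pvSwapN]
  refine pvDIdx_congr _ _ _ (by simp [hlen]) ?_
  intro i h
  have h1 : ∀ (u : List Char) (k : Nat) (hk : k < (u.drop a).length),
      (u.drop a)[k] = u.getD (a + k) ' ' := by
    intro u k hk
    rw [List.getElem_drop, List.getD_eq_getElem u ' ' (by simp at hk; omega)]
  rw [h1, h1 w i (by simp only [List.length_drop, pvSwapN_length] at h ⊢; omega)]
  rw [pvSwapN_getD w p q (a + i) hp hq]
  split_ifs with hq' hp'
  · subst hq'; rw [hdp, hdq]
  · subst hp'; rw [hdq, hdp]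
  · rfl


lemma foldA_main : ∀ k (w : List Char) (j : Nat), w.length - j = k → j ≤ w.length →
    (∀ cnt : Int,
      ((PySem.List.pyRange (j : Int) (w.length : Int) 1).foldl pvStepA (w, cnt, -1)).1 =
        pvSpecN w (pvD w j)) ∧
    (∀ (p : Nat) (cnt : Int), p < j → PySem.Chars.isdigit (w.getD p ' ') = true →
      0 ≤ cnt → (cnt ≠ 0 ↔ pvAnyA w (p + 1) j = true) →
      ((PySem.List.pyRange (j : Int) (w.length : Int) 1).foldl pvStepA (w, cnt, (p : Int))).1 =
        pvSpecN w (p :: pvD w j)) := by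
  intro k
  induction k with
  | zero =>
    intro w j hk hj
    have hj' : j = w.length := by omega
    subst hj'
    rw [PySem.List.pyRange_one_eq_nil (le_refl _)]
    constructor
    · intro cnt; rw [List.foldl_nil, pvD_end]; rfl
    · intro p cnt _ _ _ _; rw [List.foldl_nil, pvD_end]; rfl
  | succ k ih =>
    intro w j hk hj
    have hjlt : j < w.length := by omega
    have hrange : PySem.List.pyRange (j : Int) (w.length : Int) 1
        = (j : Int) :: PySem.List.pyRange ((j : Int) + 1) (w.length : Int) 1 :=
      PySem.List.pyRange_one_cons (by exact_mod_cast hjlt)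
    have hcast : ((j : Int) + 1) = (((j + 1 : Nat)) : Int) := by push_cast; ring
    constructor
    · -- idle state
      intro cnt
      rw [hrange, List.foldl_cons]
      by_cases hd : PySem.Chars.isdigit (w.getD j ' ')
      · have hstep : pvStepA (w, cnt, -1) (j : Int) = (w, 0, (j : Int)) := by
          simp only [pvStepA, PySem.List.pyGetD_natCast]; rw [hd]; simp
        rw [hstep, hcast]
        have := (ih w (j + 1) (by omega) (by omega)).2 j 0 (by omega) hd (le_refl 0)
          (by simp [pvAnyA_self])
        rw [this, pvD_step w j hjlt, if_pos hd]
      · have h3 : pvD w j = pvD w (j + 1) := by rw [pvD_step w j hjlt, if_neg hd]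
        by_cases ha : PySem.Chars.isalpha (w.getD j ' ')
        · have hstep : pvStepA (w, cnt, -1) (j : Int) = (w, cnt + 1, -1) := by
            simp only [pvStepA, PySem.List.pyGetD_natCast]; rw [eq_false_of_ne_true hd, ha]; simp
          rw [hstep, hcast, (ih w (j + 1) (by omega) (by omega)).1 (cnt + 1), h3]
        · have hstep : pvStepA (w, cnt, -1) (j : Int) = (w, cnt, -1) := by
            simp only [pvStepA, PySem.List.pyGetD_natCast]; rw [eq_false_of_ne_true hd, eq_false_of_ne_true ha]; simp
          rw [hstep, hcast, (ih w (j + 1) (by omega) (by omega)).1 cnt, h3]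
    · -- pending state: first digit at p, cnt tracks letters in (p, j)
      intro p cnt hpj hdp hcnt hinv
      rw [hrange, List.foldl_cons]
      have hpne : ((p : Int) == -1) = false := by
        rw [beq_eq_false_iff_ne]; omega
      by_cases hd : PySem.Chars.isdigit (w.getD j ' ')
      · have hstep : pvStepA (w, cnt, (p : Int)) (j : Int)
            = (if cnt != 0 then pvSwap w (p : Int) (j : Int) else w, 0, -1) := by
          simp only [pvStepA, PySem.List.pyGetD_natCast]; rw [hd, hpne]; simp
        set w' := if pvAnyA w (p + 1) j then pvSwapN w p j else w with hw'
        have hsame : (if cnt != 0 then pvSwap w (p : Int) (j : Int) else w) = w' := by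
          rw [pvSwap_natCast]
          by_cases hc : cnt = 0
          · have hfa : pvAnyA w (p + 1) j = false := by
              cases hA : pvAnyA w (p + 1) j
              · rfl
              · exact absurd hc (hinv.mpr hA)
            simp [hc, hw', hfa]
          · have hta : pvAnyA w (p + 1) j = true := hinv.mp hc
            simp [hc, hw', hta]
        have hlen : w'.length = w.length := by
          rw [hw']; split_ifs <;> simp [pvSwapN_length]
        have hDsame : pvD w' (j + 1) = pvD w (j + 1) := by
          rw [hw']; split_ifs with hA
          · exact pvD_swap w p j (by omega) hjlt hdp hd (j + 1)
          · rfl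
        rw [hstep, hsame, hcast]
        have := (ih w' (j + 1) (by omega) (by omega)).1 0
        rw [hlen] at this
        rw [this, hDsame]
        rw [pvD_step w j hjlt, if_pos hd, pvSpecN]
      · have h3 : pvD w j = pvD w (j + 1) := by rw [pvD_step w j hjlt, if_neg hd]
        by_cases ha : PySem.Chars.isalpha (w.getD j ' ')
        · have hstep : pvStepA (w, cnt, (p : Int)) (j : Int) = (w, cnt + 1, (p : Int)) := by
            simp only [pvStepA, PySem.List.pyGetD_natCast]; rw [eq_false_of_ne_true hd, hpne, ha]; simp
          rw [hstep, hcast]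
          have := (ih w (j + 1) (by omega) (by omega)).2 p (cnt + 1) (by omega) hdp (by omega)
            (by
              rw [pvAnyA_step w (p + 1) j (by omega) hjlt, ha]
              simp; omega)
          rw [this, h3]
        · have hstep : pvStepA (w, cnt, (p : Int)) (j : Int) = (w, cnt, (p : Int)) := by
            simp only [pvStepA, PySem.List.pyGetD_natCast]; rw [eq_false_of_ne_true hd, hpne, eq_false_of_ne_true ha]; simp
          rw [hstep, hcast]
          have := (ih w (j + 1) (by omega) (by omega)).2 p cnt (by omega) hdp hcnt
            (by
              rw [pvAnyA_step w (p + 1) j (by omega) hjlt, eq_false_of_ne_true ha,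
                Bool.or_false]
              exact hinv)
          rw [this, h3]

lemma pvWordA_eq (w : List Char) : pvWordA w = pvSpecN w (pvD w 0) := by
  have := (foldA_main (w.length - 0) w 0 rfl (Nat.zero_le _)).1 0
  simpa [pvWordA] using this

lemma B_idx (w : List Char) (s : Nat) :
    (((PySem.List.enumerate w (s : Int)).filter (fun jc => PySem.Chars.isdigit jc.2)).map (·.1)) =
      (pvDIdx w s).map (Nat.cast) := by
  induction w generalizing s with
  | nil => simp [PySem.List.enumerate_nil, pvDIdx]
  | cons c t ih =>
    rw [PySem.List.enumerate_cons]
    have hc : ((s : Int) + 1) = ((s + 1 : Nat) : Int) := by push_cast; ring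
    rw [hc, List.filter_cons]
    by_cases h : PySem.Chars.isdigit c
    · rw [pvDIdx, if_pos h]
      simp only [h, if_pos]
      rw [List.map_cons, List.map_cons, ih (s + 1)]
    · rw [pvDIdx, if_neg h]
      simp only [h]
      rw [if_neg (by simp), ih (s + 1)]

lemma B_apply : ∀ (idx : List Nat) (w : List Char),
    pvApplyB w (idx.map (Nat.cast)) = pvSpecN w idx
  | [], w => by simp [pvApplyB, pvSpecN]
  | [p], w => by simp [pvApplyB, pvSpecN]
  | p :: q :: rest, w => by
    rw [List.map_cons, List.map_cons, pvApplyB, pvSpecN]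
    rw [B_apply rest]
    congr 1
    have hc : ((p : Int) + 1) = ((p + 1 : Nat) : Int) := by push_cast; ring
    rw [hc, PySem.List.slice_natCast, pvSwap_natCast]
    simp [pvAnyA]

lemma pvWordB_eq (w : List Char) : pvWordB w = pvSpecN w (pvD w 0) := by
  have h0 : pvD w 0 = pvDIdx w 0 := by simp [pvD]
  rw [pvWordB, show ((0 : Int) = ((0 : Nat) : Int)) from rfl, B_idx, B_apply, h0]

lemma word_eq (w : List Char) : pvWordA w = pvWordB w := by
  rw [pvWordA_eq, pvWordB_eq]

-- ===== VERDICT =====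
theorem SwapII_spec : Claim_equal_SwapII := by
  intro s _
  unfold Spec_SwapII SwapII SwapII_alt
  congr 1
  exact congrArg _ (List.map_congr_left (fun w _ => word_eq w))
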